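-- pv_equiv track=rewrite | github.com/JoergHeseler/stl-metadata-extractor-for-archivematica | src/stl-metadata-extractor.py | has_isolated_triangle
-- ===== SOURCE A (Python) =====
-- def has_isolated_triangle(triangles):
--     for i, tri1 in enumerate(triangles):
--         shared_count = 0
--         for j, tri2 in enumerate(triangles):
--             if i != j:
--                 shared_vertices = set(tuple(v) for v in tri1).intersection(set(tuple(v) for v in tri2))
--                 if len(shared_vertices) == 2:
--                     shared_count += 1
--                     break
--
--         if shared_count == 0:
--             return True # i, tri1 # Found a triangle that does not share two vertices
--
--     return False # None, None # All triangles share vertices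
-- ===== SOURCE B (Python) =====
-- def has_isolated_triangle(triangles):
--     # Index every ordered pair of distinct vertices to the triangles owning it,
--     # then a triangle shares exactly two vertices with triangle j iff j owns
--     # exactly 2 of its ordered vertex pairs (k*(k-1) == 2 iff k == 2).
--     verts = [list(dict.fromkeys(tuple(v) for v in tri)) for tri in triangles]
--     owners = {}
--     for idx, vs in enumerate(verts):
--         for a in vs:
--             for b in vs:
--                 if a != b:
--                     owners.setdefault((a, b), []).append(idx)
--     for idx, vs in enumerate(verts):
--         hits = {}
--         for a in vs:
--             for b in vs:
--                 if a != b: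
--                     for j in owners.get((a, b), []):
--                         if j != idx:
--                             hits[j] = hits.get(j, 0) + 1
--         if all(c != 2 for c in hits.values()):
--             return True
--     return False
-- ===== Notes on version B (the rewrite author's own statement) =====
-- stated objective: alternative
-- what changed: A compares every triangle against every other with repeated set-intersections; B deduplicates each triangle's vertices once, builds a dict index from ordered vertex pairs to owning triangle indices, and declares a triangle isolated when no other index owns exactly two of its ordered pairs (k*(k-1)=2 iff k=2).
import Mathlib
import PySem

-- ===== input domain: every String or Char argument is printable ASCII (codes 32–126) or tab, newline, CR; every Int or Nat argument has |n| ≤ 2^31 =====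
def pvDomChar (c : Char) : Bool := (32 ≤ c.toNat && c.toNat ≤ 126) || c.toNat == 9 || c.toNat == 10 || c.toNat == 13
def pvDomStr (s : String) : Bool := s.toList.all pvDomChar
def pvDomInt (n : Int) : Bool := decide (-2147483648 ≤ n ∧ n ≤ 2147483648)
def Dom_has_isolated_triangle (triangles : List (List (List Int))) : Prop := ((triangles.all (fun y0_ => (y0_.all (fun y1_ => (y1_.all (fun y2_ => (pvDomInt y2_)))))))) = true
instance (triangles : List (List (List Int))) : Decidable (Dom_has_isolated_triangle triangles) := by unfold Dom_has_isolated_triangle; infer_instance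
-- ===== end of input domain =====

-- B replaces A's all-pairs set-intersection scan by an index from ordered vertex pairs to the
-- triangles owning them (alternative algorithm; same return value on every input).

-- ===== PORT A =====
-- len(set(tuple(v) for v in t1).intersection(set(tuple(v) for v in t2)))
def pvInterSize (t1 t2 : List (List Int)) : Nat :=
  (PySem.Set.inter (PySem.Set.ofList t1) (PySem.Set.ofList t2)).length

-- the inner 'for j, tri2 in enumerate(triangles)' loop: final value of shared_count (0, or 1 at the break)
def pvAInner (i : Int) (tri1 : List (List Int)) (l : List (Int × List (List Int))) : Nat :=
  match l with
  | [] => 0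
  | (j, tri2) :: rest =>
    if i ≠ j then
      if pvInterSize tri1 tri2 = 2 then 1
      else pvAInner i tri1 rest
    else pvAInner i tri1 rest

-- the outer 'for i, tri1 in enumerate(triangles)' loop with its early 'return True'
def pvAOuter (triangles : List (List (List Int))) (l : List (Int × List (List Int))) : Bool :=
  match l with
  | [] => false
  | (i, tri1) :: rest =>
    if pvAInner i tri1 (PySem.List.enumerate triangles) = 0 then true
    else pvAOuter triangles rest

def has_isolated_triangle (triangles : List (List (List Int))) : Bool :=
  pvAOuter triangles (PySem.List.enumerate triangles)

-- ===== PORT B =====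
-- phase 1: owners[(a,b)] = indices of the triangles whose vertex set contains both a and b (a ≠ b)
def pvOwners (verts : List (List (List Int))) :
    PySem.Dict (List Int × List Int) (List Int) :=
  (PySem.List.enumerate verts).foldl
    (fun d p =>
      p.2.foldl (fun d a =>
        p.2.foldl (fun d b =>
          if a ≠ b then d.modify (a, b) [] (fun l => l ++ [p.1]) else d) d) d)
    PySem.Dict.empty

-- hits = per-triangle counter over the owners of its ordered vertex pairs
def pvHits (owners : PySem.Dict (List Int × List Int) (List Int)) (idx : Int)
    (vs : List (List Int)) : PySem.Dict Int Int :=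
  vs.foldl (fun d a =>
    vs.foldl (fun d b =>
      if a ≠ b then
        (owners.getD (a, b) []).foldl (fun d j =>
          if j ≠ idx then d.insert j (d.getD j 0 + 1) else d) d
      else d) d) PySem.Dict.empty

-- phase 2: 'for idx, vs in enumerate(verts)' with its early 'return True'
def pvBLoop (owners : PySem.Dict (List Int × List Int) (List Int))
    (l : List (Int × List (List Int))) : Bool :=
  match l with
  | [] => false
  | (idx, vs) :: rest =>
    if (pvHits owners idx vs).values.all (fun c => c != 2) then true
    else pvBLoop owners rest

def has_isolated_triangle_alt (triangles : List (List (List Int))) : Bool :=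
  let verts := triangles.map (fun tri => PySem.List.dedup tri)
  pvBLoop (pvOwners verts) (PySem.List.enumerate verts)

-- ===== PRECONDITION & SPEC =====
def Spec_has_isolated_triangle (triangles : List (List (List Int))) (out : Bool) : Prop := out = has_isolated_triangle_alt triangles
instance (triangles : List (List (List Int))) (out : Bool) : Decidable (Spec_has_isolated_triangle triangles out) := by unfold Spec_has_isolated_triangle; infer_instance

-- ===== CLAIM (what is proved, stated in full; the proofs are below) =====
def Claim_equal_has_isolated_triangle : Prop := ∀ (triangles : List (List (List Int))), Dom_has_isolated_triangle triangles → Spec_has_isolated_triangle triangles (has_isolated_triangle triangles)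

-- ===== LEMMAS AND PROOFS =====

-- 'triangle (i, tri) shares exactly two vertices with some other triangle of t' (A's inner test)
def pvShares (t : List (List (List Int))) (i : Int) (tri : List (List Int)) : Bool :=
  (PySem.List.enumerate t).any (fun q => decide (i ≠ q.1) && decide (pvInterSize tri q.2 = 2))

-- the flat list of all counted index occurrences of B's hits loop
def pvBig (ow : PySem.Dict (List Int × List Int) (List Int)) (idx : Int)
    (vs : List (List Int)) : List Int :=
  vs.flatMap (fun a => vs.flatMap (fun b =>
    if a ≠ b then (ow.getD (a, b) []).filter (fun j => decide (j ≠ idx)) else []))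

-- the value stored by phase 1 under key (a, b)
def pvOwnVal (verts : List (List (List Int))) (a b : List Int) : List Int :=
  ((PySem.List.enumerate verts).filter
    (fun p => decide (a ∈ p.2) && decide (b ∈ p.2) && decide (a ≠ b))).map (fun p => p.1)

theorem pvAInner_eq_zero_iff (i : Int) (tri : List (List Int)) (l : List (Int × List (List Int))) :
    pvAInner i tri l = 0 ↔
      l.any (fun q => decide (i ≠ q.1) && decide (pvInterSize tri q.2 = 2)) = false := by
  induction l with
  | nil => simp [pvAInner]
  | cons q rest ih =>
    obtain ⟨j, tri2⟩ := q
    rw [List.any_cons]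
    by_cases h1 : i = j
    · subst h1
      rw [show pvAInner i tri ((i, tri2) :: rest) = pvAInner i tri rest from by
        simp [pvAInner]]
      rw [ih]
      simp
    · by_cases h2 : pvInterSize tri tri2 = 2
      · rw [show pvAInner i tri ((j, tri2) :: rest) = 1 from by simp [pvAInner, h1, h2]]
        simp [h1, h2]
      · rw [show pvAInner i tri ((j, tri2) :: rest) = pvAInner i tri rest from by
          simp [pvAInner, h1, h2]]
        rw [ih]
        simp [h1, h2]

theorem pvAOuter_eq (t : List (List (List Int))) (l : List (Int × List (List Int))) :
    pvAOuter t l = l.any (fun p => !pvShares t p.1 p.2) := by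
  induction l with
  | nil => simp [pvAOuter]
  | cons p rest ih =>
    obtain ⟨i, tri⟩ := p
    by_cases h : pvAInner i tri (PySem.List.enumerate t) = 0
    · have hs : pvShares t i tri = false := (pvAInner_eq_zero_iff _ _ _).mp h
      simp [pvAOuter, h, hs]
    · have hs : pvShares t i tri = true := by
        cases hx : pvShares t i tri
        · exact absurd ((pvAInner_eq_zero_iff i tri (PySem.List.enumerate t)).mpr hx) h
        · rfl
      simp [pvAOuter, h, hs, ih]

theorem pvBLoop_eq (ow : PySem.Dict (List Int × List Int) (List Int))
    (l : List (Int × List (List Int))) :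
    pvBLoop ow l = l.any (fun p => (pvHits ow p.1 p.2).values.all (fun c => c != 2)) := by
  induction l with
  | nil => simp [pvBLoop]
  | cons p rest ih =>
    obtain ⟨idx, vs⟩ := p
    by_cases h : (pvHits ow idx vs).values.all (fun c => c != 2) = true
    · simp [pvBLoop, h]
    · simp [pvBLoop, h, ih]

theorem pvEnumerate_map {α β : Type} (f : α → β) (l : List α) (s : Int) :
    PySem.List.enumerate (l.map f) s = (PySem.List.enumerate l s).map (fun p => (p.1, f p.2)) := by
  induction l generalizing s with
  | nil => simp [PySem.List.enumerate]
  | cons x xs ih => simp [PySem.List.enumerate, ih]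

theorem pvHits_eq_counter (ow : PySem.Dict (List Int × List Int) (List Int)) (idx : Int)
    (vs : List (List Int)) :
    pvHits ow idx vs = PySem.Dict.counter (pvBig ow idx vs) := by
  unfold pvHits pvBig
  rw [← PySem.Dict.foldl_insert_getD_add_one_eq_counter]
  rw [List.foldl_flatMap]
  apply PySem.List.foldl_congr_mem
  intro d a _
  rw [List.foldl_flatMap]
  apply PySem.List.foldl_congr_mem
  intro d' b _
  by_cases hab : a = b
  · simp [hab]
  · rw [if_pos hab, if_pos hab]
    exact PySem.List.foldl_ite_eq_foldl_filter (fun j => j ≠ idx)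
      (fun (d : PySem.Dict Int Int) (j : Int) => d.insert j (d.getD j 0 + 1))
      (ow.getD (a, b) []) d'

-- sum of (if p x then c else 0) over l is (number of x with p x) * c
theorem pvSumIfP {α : Type} (l : List α) (p : α → Prop) [DecidablePred p] (c : Nat) :
    (l.map (fun x => if p x then c else 0)).sum = (l.countP fun x => decide (p x)) * c := by
  induction l with
  | nil => simp
  | cons x xs ih =>
    by_cases h : p x
    · simp [h, ih, Nat.add_mul, Nat.add_comm]
    · simp [h, ih]

theorem pvCountPairs (vs : List (List Int)) (a b : List Int) :
    ((vs.flatMap (fun x => vs.map (fun y => (x, y)))).count (a, b)) = vs.count a * vs.count b := by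
  rw [List.count_flatMap]
  have h : ∀ x : List Int, ((vs.map (fun y => (x, y))).count (a, b))
      = if x = a then vs.count b else 0 := by
    intro x
    by_cases hx : x = a
    · subst hx
      rw [if_pos rfl]
      exact List.count_map_of_injective vs (fun y => (x, y))
        (fun y z h => ((Prod.mk.injEq _ _ _ _).mp h).2) b
    · rw [if_neg hx, List.count_eq_zero]
      intro hmem
      obtain ⟨y, _, hy⟩ := List.mem_map.mp hmem
      exact hx ((Prod.mk.injEq _ _ _ _).mp hy).1
  calc (vs.map (List.count (a, b) ∘ fun x => vs.map (fun y => (x, y)))).sum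
      = (vs.map (fun x => if x = a then vs.count b else 0)).sum :=
        congrArg List.sum (List.map_congr_left (fun x _ => h x))
    _ = (vs.countP fun x => decide (x = a)) * vs.count b := pvSumIfP vs (fun x => x = a) _
    _ = vs.count a * vs.count b := by
        congr 1
        rw [List.count]
        exact List.countP_congr (fun x _ => by simp)

-- effect on key (a, b) of the double loop over one triangle's (duplicate-free) vertex list
theorem pvOwnersStep (vs : List (List Int)) (hv : vs.Nodup) (idx : Int)
    (d : PySem.Dict (List Int × List Int) (List Int)) (a b : List Int) :
    (vs.foldl (fun d a' =>
      vs.foldl (fun d b' =>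
        if a' ≠ b' then d.modify (a', b') [] (fun l => l ++ [idx]) else d) d) d).getD (a, b) []
    = d.getD (a, b) [] ++ (if a ∈ vs ∧ b ∈ vs ∧ a ≠ b then [idx] else []) := by
  have step1 : (vs.foldl (fun d a' =>
      vs.foldl (fun d b' =>
        if a' ≠ b' then d.modify (a', b') [] (fun l => l ++ [idx]) else d) d) d)
      = ((vs.flatMap (fun x => vs.map (fun y => (x, y)))).filter
          (fun q => decide (q.1 ≠ q.2))).foldl
          (fun d q => d.modify q [] (fun l => l ++ [idx])) d := by
    calc (vs.foldl (fun d a' =>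
          vs.foldl (fun d b' =>
            if a' ≠ b' then d.modify (a', b') [] (fun l => l ++ [idx]) else d) d) d)
        = (vs.flatMap (fun x => vs.map (fun y => (x, y)))).foldl
            (fun d q => if q.1 ≠ q.2 then d.modify q [] (fun l => l ++ [idx]) else d) d := by
          rw [List.foldl_flatMap]
          apply PySem.List.foldl_congr_mem
          intro d' x _
          rw [List.foldl_map]
      _ = ((vs.flatMap (fun x => vs.map (fun y => (x, y)))).filter
            (fun q => decide (q.1 ≠ q.2))).foldl
            (fun d q => d.modify q [] (fun l => l ++ [idx])) d :=
          PySem.List.foldl_ite_eq_foldl_filter (fun q : List Int × List Int => q.1 ≠ q.2)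
            (fun (d : PySem.Dict (List Int × List Int) (List Int)) (q : List Int × List Int) =>
              d.modify q [] (fun l => l ++ [idx])) _ d
  rw [step1]
  have step2 : ((vs.flatMap (fun x => vs.map (fun y => (x, y)))).filter
          (fun q => decide (q.1 ≠ q.2))).foldl
          (fun d q => d.modify q [] (fun l => l ++ [idx])) d
      = (((vs.flatMap (fun x => vs.map (fun y => (x, y)))).filter
          (fun q => decide (q.1 ≠ q.2))).map (fun q => (q, idx))).foldl
          (fun d pr => d.modify pr.1 [] (fun l => l ++ [pr.2])) d := by
    rw [List.foldl_map]
  rw [step2, PySem.Dict.getD_foldl_modify_append]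
  congr 1
  rw [List.filter_map, List.map_map]
  have hcomp : ((fun pr : (List Int × List Int) × Int => pr.1 == (a, b)) ∘ (fun q => (q, idx)))
      = (fun q : List Int × List Int => q == (a, b)) := rfl
  rw [hcomp, List.filter_beq, List.map_replicate]
  have hcount : (((vs.flatMap (fun x => vs.map (fun y => (x, y)))).filter
      (fun q => decide (q.1 ≠ q.2))).count (a, b))
      = if a ∈ vs ∧ b ∈ vs ∧ a ≠ b then 1 else 0 := by
    by_cases hab : a = b
    · rw [List.count_eq_zero.mpr, if_neg (by simp [hab])]
      intro hmem
      have hf := List.of_mem_filter hmem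
      simp only [decide_eq_true_eq] at hf
      exact hf hab
    · rw [List.count_filter (by simpa using hab), pvCountPairs,
        (List.Nodup.count hv : vs.count a = _), (List.Nodup.count hv : vs.count b = _)]
      by_cases ha : a ∈ vs <;> by_cases hb : b ∈ vs <;> simp [ha, hb, hab]
  rw [hcount]
  split <;> rfl

-- phase 1 characterized: owners[(a, b)] is the ordered list of indices owning the pair
theorem pvOwners_getD (verts : List (List (List Int))) (hnd : ∀ vs ∈ verts, vs.Nodup)
    (a b : List Int) :
    (pvOwners verts).getD (a, b) [] = pvOwnVal verts a b := by
  have aux : ∀ (L : List (Int × List (List Int))), (∀ p ∈ L, p.2.Nodup) →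
      ∀ d : PySem.Dict (List Int × List Int) (List Int),
      (L.foldl (fun d p =>
        p.2.foldl (fun d a' =>
          p.2.foldl (fun d b' =>
            if a' ≠ b' then d.modify (a', b') [] (fun l => l ++ [p.1]) else d) d) d) d).getD (a, b) []
      = d.getD (a, b) [] ++
          (L.filter (fun p => decide (a ∈ p.2) && decide (b ∈ p.2) && decide (a ≠ b))).map
            (fun p => p.1) := by
    intro L
    induction L with
    | nil => intro _ d; simp
    | cons p L ih =>
      intro h d
      rw [List.foldl_cons, ih (fun q hq => h q (List.mem_cons_of_mem _ hq)),
        pvOwnersStep p.2 (h p List.mem_cons_self) p.1 d a b, List.filter_cons]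
      by_cases hc : a ∈ p.2 ∧ b ∈ p.2 ∧ a ≠ b
      · rw [if_pos hc, if_pos (by simp [hc.1, hc.2.1, hc.2.2])]
        simp
      · rw [if_neg hc,
          if_neg (by
            intro hb
            simp only [Bool.and_eq_true, decide_eq_true_eq] at hb
            exact hc ⟨hb.1.1, hb.1.2, hb.2⟩)]
        simp
  have hmem : ∀ p ∈ PySem.List.enumerate verts, p.2.Nodup := by
    intro p hp
    obtain ⟨k, hk, rfl⟩ := (PySem.List.mem_enumerate_iff verts 0 p).mp hp
    exact hnd _ (List.getElem_mem hk)
  unfold pvOwners pvOwnVal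
  rw [aux (PySem.List.enumerate verts) hmem PySem.Dict.empty, PySem.Dict.getD_empty]
  simp

-- count of an index j in owners[(a,b)]
theorem pvOwnVal_count (verts : List (List (List Int))) (_hnd : ∀ vs ∈ verts, vs.Nodup)
    (a b : List Int) (j : Int) :
    (pvOwnVal verts a b).count j =
      if 0 ≤ j ∧ j.toNat < verts.length ∧ a ∈ verts.getD j.toNat [] ∧ b ∈ verts.getD j.toNat [] ∧ a ≠ b
      then 1 else 0 := by
  have pw : (((PySem.List.enumerate verts).filter
      (fun p => decide (a ∈ p.2) && decide (b ∈ p.2) && decide (a ≠ b))).map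
        (fun p => p.1)).Pairwise (· < ·) :=
    List.pairwise_map.mpr ((PySem.List.pairwise_lt_enumerate verts 0).filter _)
  have nd : (pvOwnVal verts a b).Nodup := pw.imp fun h => ne_of_lt h
  rw [List.Nodup.count nd]
  by_cases hC : 0 ≤ j ∧ j.toNat < verts.length ∧ a ∈ verts.getD j.toNat [] ∧
      b ∈ verts.getD j.toNat [] ∧ a ≠ b
  · rw [if_pos hC, if_pos]
    obtain ⟨h0, hlen, ha, hb, hab⟩ := hC
    rw [List.getD_eq_getElem verts [] hlen] at ha hb
    apply List.mem_map.mpr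
    refine ⟨(0 + (j.toNat : Int), verts[j.toNat]), List.mem_filter.mpr ⟨?_, ?_⟩, ?_⟩
    · exact (PySem.List.mem_enumerate_iff verts 0 _).mpr ⟨j.toNat, hlen, rfl⟩
    · simp only [Bool.and_eq_true, decide_eq_true_eq]
      exact ⟨⟨ha, hb⟩, hab⟩
    · simp [Int.toNat_of_nonneg h0]
  · rw [if_neg hC, if_neg]
    intro hj
    obtain ⟨p, hpf, hpj⟩ := List.mem_map.mp hj
    obtain ⟨hpe, hP⟩ := List.mem_filter.mp hpf
    obtain ⟨k, hk, rfl⟩ := (PySem.List.mem_enumerate_iff verts 0 p).mp hpe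
    simp only [Bool.and_eq_true, decide_eq_true_eq] at hP
    apply hC
    have hj0 : j = (k : Int) := by simpa using hpj.symm
    have h0 : 0 ≤ j := by omega
    have htn : j.toNat = k := by omega
    refine ⟨h0, by omega, ?_, ?_, hP.2⟩
    · rw [List.getD_eq_getElem verts [] (by omega)]
      have : verts[j.toNat] = verts[k] := by congr 1
      rw [this]
      simpa using hP.1.1
    · rw [List.getD_eq_getElem verts [] (by omega)]
      have : verts[j.toNat] = verts[k] := by congr 1
      rw [this]
      simpa using hP.1.2

-- k(k-1) = 2 exactly at k = 2
theorem pvKK (k : Nat) : k * (k - 1) = 2 ↔ k = 2 := by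
  constructor
  · intro h
    by_contra hne
    rcases k with _ | _ | _ | n
    · simp at h
    · simp at h
    · exact hne rfl
    · have h2 : (n + 3) * (n + 3 - 1) = (n + 3) * (n + 2) := rfl
      rw [h2] at h
      nlinarith
  · rintro rfl; rfl

-- removing one satisfying element from a duplicate-free count
theorem pvCountPminus {α : Type} [DecidableEq α] (l : List α) (hl : l.Nodup) (q : α → Prop)
    [DecidablePred q] (a : α) (ha : a ∈ l) (haq : q a) :
    l.countP (fun b => decide (q b ∧ b ≠ a)) = l.countP (fun b => decide (q b)) - 1 := by
  have h1 : l.countP (fun b => decide (q b ∧ b ≠ a))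
      = (l.filter (fun b => decide (q b))).countP (fun b => decide (b ≠ a)) := by
    rw [List.countP_filter]
    exact (List.countP_congr (fun x _ => by
      by_cases hq : q x <;> by_cases hx : x = a <;> simp [hq, hx])).symm
  have hsnd : (l.filter (fun b => decide (q b))).Nodup := hl.filter _
  have has : a ∈ l.filter (fun b => decide (q b)) := List.mem_filter.mpr ⟨ha, by simpa⟩
  have hlen : (l.filter (fun b => decide (q b))).length = l.countP (fun b => decide (q b)) :=
    (List.countP_eq_length_filter).symm
  have hsplit := List.length_eq_countP_add_countP (fun b => b == a)
    (l := l.filter (fun b => decide (q b)))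
  have hca : (l.filter (fun b => decide (q b))).countP (fun b => b == a) = 1 := by
    have : (l.filter (fun b => decide (q b))).countP (fun b => b == a)
        = (l.filter (fun b => decide (q b))).count a := rfl
    rw [this, List.Nodup.count hsnd, if_pos has]
  have hcongr : (l.filter (fun b => decide (q b))).countP (fun b => decide ¬(b == a) = true)
      = (l.filter (fun b => decide (q b))).countP (fun b => decide (b ≠ a)) :=
    List.countP_congr (fun x _ => by by_cases hx : x = a <;> simp [hx])
  rw [h1]
  omega

-- count of j in the flat hits list of triangle (i, tri)
theorem pvBig_count (t : List (List (List Int))) (i : Int) (tri : List (List Int)) (j : Int) :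
    (pvBig (pvOwners (t.map PySem.List.dedup)) i (PySem.List.dedup tri)).count j =
      if 0 ≤ j ∧ j.toNat < t.length ∧ j ≠ i then
        (PySem.List.dedup tri).countP
            (fun v => decide (v ∈ PySem.List.dedup (t.getD j.toNat []))) *
          ((PySem.List.dedup tri).countP
            (fun v => decide (v ∈ PySem.List.dedup (t.getD j.toNat []))) - 1)
      else 0 := by
  have hnd : ∀ vs ∈ t.map PySem.List.dedup, vs.Nodup := by
    intro vs hv
    obtain ⟨x, _, rfl⟩ := List.mem_map.mp hv
    exact PySem.Set.nodup_ofList x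
  have hVg : (t.map PySem.List.dedup).getD j.toNat [] = PySem.List.dedup (t.getD j.toNat []) :=
    List.getD_map t [] PySem.List.dedup
  have hcnt : ∀ a b : List Int,
      ((if a ≠ b then
        ((pvOwners (t.map PySem.List.dedup)).getD (a, b) []).filter (fun j' => decide (j' ≠ i))
        else []).count j)
      = if (0 ≤ j ∧ j.toNat < t.length ∧ j ≠ i) ∧ a ∈ PySem.List.dedup (t.getD j.toNat []) ∧
          b ∈ PySem.List.dedup (t.getD j.toNat []) ∧ a ≠ b then 1 else 0 := by
    intro a b
    by_cases hab : a = b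
    · rw [if_neg (by simpa using hab), if_neg (by rintro ⟨_, _, _, h⟩; exact h hab)]
      rfl
    · rw [if_pos hab]
      by_cases hji : j = i
      · rw [List.count_eq_zero.mpr, if_neg (by rintro ⟨⟨_, _, h⟩, _⟩; exact h hji)]
        intro hmem
        have := List.of_mem_filter hmem
        simp at this
        exact this hji
      · rw [List.count_filter (by simpa using hji),
          pvOwners_getD (t.map PySem.List.dedup) hnd a b,
          pvOwnVal_count (t.map PySem.List.dedup) hnd a b j]
        rw [List.length_map, hVg]
        have hiff : (0 ≤ j ∧ j.toNat < t.length ∧ a ∈ PySem.List.dedup (t.getD j.toNat []) ∧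
              b ∈ PySem.List.dedup (t.getD j.toNat []) ∧ a ≠ b)
            ↔ ((0 ≤ j ∧ j.toNat < t.length ∧ j ≠ i) ∧ a ∈ PySem.List.dedup (t.getD j.toNat []) ∧
              b ∈ PySem.List.dedup (t.getD j.toNat []) ∧ a ≠ b) := by
          constructor
          · rintro ⟨h1, h2, h3, h4, h5⟩; exact ⟨⟨h1, h2, hji⟩, h3, h4, h5⟩
          · rintro ⟨⟨h1, h2, _⟩, h3, h4, h5⟩; exact ⟨h1, h2, h3, h4, h5⟩
        rw [if_congr hiff rfl rfl]
  unfold pvBig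
  rw [List.count_flatMap]
  have hrw : (PySem.List.dedup tri).map
        (List.count j ∘ fun a => (PySem.List.dedup tri).flatMap fun b =>
          if a ≠ b then
            ((pvOwners (t.map PySem.List.dedup)).getD (a, b) []).filter (fun j' => decide (j' ≠ i))
          else [])
      = (PySem.List.dedup tri).map (fun a => ((PySem.List.dedup tri).map (fun b =>
          if (0 ≤ j ∧ j.toNat < t.length ∧ j ≠ i) ∧ a ∈ PySem.List.dedup (t.getD j.toNat []) ∧
            b ∈ PySem.List.dedup (t.getD j.toNat []) ∧ a ≠ b then 1 else 0)).sum) := by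
    apply List.map_congr_left
    intro a _
    show List.count j _ = _
    rw [List.count_flatMap]
    congr 1
    apply List.map_congr_left
    intro b _
    exact hcnt a b
  rw [hrw]
  by_cases hC : 0 ≤ j ∧ j.toNat < t.length ∧ j ≠ i
  · rw [if_pos hC]
    set V := PySem.List.dedup (t.getD j.toNat []) with hV
    set vs := PySem.List.dedup tri with hvs
    have hvnd : vs.Nodup := PySem.Set.nodup_ofList tri
    set K := vs.countP (fun v => decide (v ∈ V)) with hK
    have hinner : ∀ a ∈ vs, ((vs.map (fun b =>
        if (0 ≤ j ∧ j.toNat < t.length ∧ j ≠ i) ∧ a ∈ V ∧ b ∈ V ∧ a ≠ b then 1 else 0)).sum)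
        = if a ∈ V then K - 1 else 0 := by
      intro a ha
      rw [pvSumIfP vs (fun b => (0 ≤ j ∧ j.toNat < t.length ∧ j ≠ i) ∧ a ∈ V ∧ b ∈ V ∧ a ≠ b) 1,
        Nat.mul_one]
      by_cases haV : a ∈ V
      · rw [if_pos haV]
        have : vs.countP (fun b => decide ((0 ≤ j ∧ j.toNat < t.length ∧ j ≠ i) ∧
            a ∈ V ∧ b ∈ V ∧ a ≠ b)) = vs.countP (fun b => decide (b ∈ V ∧ b ≠ a)) :=
          List.countP_congr (fun x _ => by
            simp only [decide_eq_true_eq]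
            constructor
            · rintro ⟨_, _, hxV, hax⟩
              exact ⟨hxV, fun h => hax h.symm⟩
            · rintro ⟨hxV, hxa⟩
              exact ⟨hC, haV, hxV, fun h => hxa h.symm⟩)
        rw [this]
        exact pvCountPminus vs hvnd (fun b => b ∈ V) a ha haV
      · rw [if_neg haV, List.countP_eq_zero.mpr]
        intro x _
        simp [haV]
    have hout : (vs.map (fun a => ((vs.map (fun b =>
        if (0 ≤ j ∧ j.toNat < t.length ∧ j ≠ i) ∧ a ∈ V ∧ b ∈ V ∧ a ≠ b then 1 else 0)).sum))).sum
        = (vs.map (fun a => if a ∈ V then K - 1 else 0)).sum := by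
      exact congrArg List.sum (List.map_congr_left hinner)
    rw [hout, pvSumIfP vs (fun a => a ∈ V) (K - 1)]
  · rw [if_neg hC]
    have : ∀ a ∈ PySem.List.dedup tri, ((PySem.List.dedup tri).map (fun b =>
        if (0 ≤ j ∧ j.toNat < t.length ∧ j ≠ i) ∧ a ∈ PySem.List.dedup (t.getD j.toNat []) ∧
          b ∈ PySem.List.dedup (t.getD j.toNat []) ∧ a ≠ b then 1 else 0)).sum = 0 := by
      intro a _
      rw [List.sum_eq_zero]
      intro x hx
      obtain ⟨b, _, rfl⟩ := List.mem_map.mp hx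
      rw [if_neg (by rintro ⟨h, _⟩; exact hC h)]
    rw [congrArg List.sum (List.map_congr_left this)]
    simp

-- A's intersection size is B's membership count
theorem pvInterSize_eq (t1 t2 : List (List Int)) :
    pvInterSize t1 t2 =
      (PySem.List.dedup t1).countP (fun v => decide (v ∈ PySem.List.dedup t2)) := by
  unfold pvInterSize PySem.Set.inter
  rw [← List.countP_eq_length_filter]
  apply List.countP_congr
  intro x _
  simp [PySem.List.dedup, PySem.Set.contains_eq_listContains, List.contains_eq_mem]

theorem pvMain (t : List (List (List Int))) (i : Int) (tri : List (List Int)) :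
    (pvHits (pvOwners (t.map PySem.List.dedup)) i (PySem.List.dedup tri)).values.all
        (fun c => c != 2)
      = !pvShares t i tri := by
  rw [pvHits_eq_counter]
  have hvals : (PySem.Dict.counter
        (pvBig (pvOwners (t.map PySem.List.dedup)) i (PySem.List.dedup tri))).values
      = (PySem.Set.ofList (pvBig (pvOwners (t.map PySem.List.dedup)) i (PySem.List.dedup tri))).map
          (fun k => (((pvBig (pvOwners (t.map PySem.List.dedup)) i (PySem.List.dedup tri)).count k
            : Int))) := by
    show ((PySem.Dict.counter _).items.map (fun x => x.2)) = _
    rw [PySem.Dict.items_counter, List.map_map]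
    rfl
  rw [hvals, List.all_map, Bool.eq_iff_iff, List.all_eq_true]
  constructor
  · intro H
    have hfalse : pvShares t i tri = false := by
      unfold pvShares
      rw [List.any_eq_false]
      intro q hq
      obtain ⟨m, hm, rfl⟩ := (PySem.List.mem_enumerate_iff t 0 q).mp hq
      simp only [Bool.and_eq_true, decide_eq_true_eq, not_and]
      intro hne hint
      have hK : (PySem.List.dedup tri).countP
          (fun v => decide (v ∈ PySem.List.dedup (t.getD ((m : Int)).toNat []))) = 2 := by
        have htn : ((m : Int)).toNat = m := Int.toNat_natCast m
        rw [htn, List.getD_eq_getElem t [] hm, ← pvInterSize_eq]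
        simpa using hint
      have hcount := pvBig_count t i tri (m : Int)
      rw [if_pos ⟨Int.natCast_nonneg m, by simpa [Int.toNat_natCast] using hm,
        by simpa using (fun h => hne (by omega))⟩, hK] at hcount
      have hmem : (m : Int) ∈ PySem.Set.ofList
          (pvBig (pvOwners (t.map PySem.List.dedup)) i (PySem.List.dedup tri)) := by
        rw [PySem.Set.mem_ofList]
        exact List.count_pos_iff.mp (by rw [hcount]; omega)
      have hcontra := H _ hmem
      simp only [Function.comp_apply, hcount] at hcontra
      simp at hcontra
    rw [hfalse]
    rfl
  · intro H k hk
    have Hf : pvShares t i tri = false := by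
      cases hps : pvShares t i tri
      · rfl
      · rw [hps] at H
        exact absurd H (by simp)
    simp only [Function.comp_apply]
    rw [bne_iff_ne]
    intro hc2
    have hc2n : (pvBig (pvOwners (t.map PySem.List.dedup)) i (PySem.List.dedup tri)).count k = 2 := by
      exact_mod_cast hc2
    rw [pvBig_count] at hc2n
    by_cases hC : 0 ≤ k ∧ k.toNat < t.length ∧ k ≠ i
    · rw [if_pos hC] at hc2n
      have hK2 := (pvKK _).mp hc2n
      have hsh : pvShares t i tri = true := by
        unfold pvShares
        rw [List.any_eq_true]
        refine ⟨(0 + (k.toNat : Int), t[k.toNat]'hC.2.1),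
          (PySem.List.mem_enumerate_iff t 0 _).mpr ⟨k.toNat, hC.2.1, rfl⟩, ?_⟩
        simp only [Bool.and_eq_true, decide_eq_true_eq]
        have hkk : ((k.toNat : Int)) = k := Int.toNat_of_nonneg hC.1
        constructor
        · simp only [zero_add, hkk]
          exact fun h => hC.2.2 (h.symm)
        · rw [pvInterSize_eq]
          rw [List.getD_eq_getElem t [] hC.2.1] at hK2
          exact hK2
      rw [hsh] at Hf
      exact absurd Hf (by simp)
    · rw [if_neg hC] at hc2n
      omega

-- ===== VERDICT (by name: the statement is the Claim_ definition above) =====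
theorem has_isolated_triangle_spec : Claim_equal_has_isolated_triangle := by
  intro t _
  unfold Spec_has_isolated_triangle has_isolated_triangle has_isolated_triangle_alt
  rw [pvAOuter_eq, pvBLoop_eq, pvEnumerate_map, List.any_map]
  exact (PySem.List.any_congr_mem (fun p _ => (pvMain t p.1 p.2).symm))
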